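-- pv_equiv track=rewrite | github.com/msjsc001/Logseq-to-Obsidian | Logseq to Obsidian.py | convert_logseq_properties_to_yaml
-- ===== SOURCE A (Python) =====
-- def convert_logseq_properties_to_yaml(lines):
--     """Converts Logseq properties at the start of a file to Obsidian YAML frontmatter."""
--     properties = {}
--     property_lines_count = 0
--     in_properties_block = False
--
--     for i, line in enumerate(lines):
--         line_stripped = line.strip()
--         if '::' in line_stripped and not line_stripped.startswith('- '):
--             is_property_line = (i == 0) or (in_properties_block) or (lines[i-1].strip() == '')
--             if is_property_line:
--                 in_properties_block = True
--             else:
--                 break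
--         elif line_stripped == "" and in_properties_block:
--             continue
--         elif in_properties_block:
--             break
--         else:
--             return lines, 0
--
--         if in_properties_block:
--             key, *value_parts = line_stripped.split('::', 1)
--             key = key.strip()
--             if not key: continue
--             value_str = value_parts[0].strip() if value_parts else ''
--             if key == 'alias': key = 'aliases'
--             values = [v.strip() for v in value_str.split(',') if v.strip()]
--             properties[key] = values
--             property_lines_count = i + 1
--
--     if not properties:
--         return lines, 0
--
--     yaml_lines = ['---\n']
--     for key, values in properties.items():
--         yaml_lines.append(f'{key}:\n')
--         for value in values:
--             yaml_lines.append(f'  - "{value}"\n')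
--     yaml_lines.append('---\n')
--
--     return yaml_lines + lines[property_lines_count:], len(yaml_lines)
-- ===== SOURCE B (Python) =====
-- def convert_logseq_properties_to_yaml(lines):
--     """Converts Logseq properties at the start of a file to Obsidian YAML frontmatter."""
--     def is_prop(line):
--         ls = line.strip()
--         return '::' in ls and not ls.startswith('- ')
--
--     # Phase 1: the property block is the longest prefix of property-or-blank
--     # lines, and it must open with a property line.
--     if not lines or not is_prop(lines[0]):
--         return lines, 0
--     block = []
--     for line in lines:
--         if is_prop(line) or not line.strip():
--             block.append(line)
--         else:
--             break
--
--     # Phase 2: parse only the block lines; cut = 1 past the last line that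
--     # actually yielded a property.
--     props = {}
--     cut = 0
--     for i, line in enumerate(block):
--         ls = line.strip()
--         if not ls:
--             continue
--         key, val = ls.split('::', 1)
--         key = key.strip()
--         if not key:
--             continue
--         if key == 'alias':
--             key = 'aliases'
--         props[key] = [w for w in (v.strip() for v in val.split(',')) if w]
--         cut = i + 1
--     if not props:
--         return lines, 0
--
--     # Phase 3: emit the frontmatter.
--     yaml = ['---\n'] + [s for k, vs in props.items()
--                         for s in [f'{k}:\n'] + [f'  - "{v}"\n' for v in vs]] + ['---\n']
--     return yaml + lines[cut:], len(yaml)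
-- ===== Notes on version B (the rewrite author's own statement) =====
-- stated objective: simpler
-- what changed: Replaces A's single fused loop with four pieces of state (dict, count, in-block flag, early-return) by three straight phases: take the longest property-or-blank prefix (provided line 0 is a property), one fold over that block building the dict and the cut point, then emit the frontmatter; the dead lines[i-1] blank-check and the in-block state machine disappear.
import Mathlib
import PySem

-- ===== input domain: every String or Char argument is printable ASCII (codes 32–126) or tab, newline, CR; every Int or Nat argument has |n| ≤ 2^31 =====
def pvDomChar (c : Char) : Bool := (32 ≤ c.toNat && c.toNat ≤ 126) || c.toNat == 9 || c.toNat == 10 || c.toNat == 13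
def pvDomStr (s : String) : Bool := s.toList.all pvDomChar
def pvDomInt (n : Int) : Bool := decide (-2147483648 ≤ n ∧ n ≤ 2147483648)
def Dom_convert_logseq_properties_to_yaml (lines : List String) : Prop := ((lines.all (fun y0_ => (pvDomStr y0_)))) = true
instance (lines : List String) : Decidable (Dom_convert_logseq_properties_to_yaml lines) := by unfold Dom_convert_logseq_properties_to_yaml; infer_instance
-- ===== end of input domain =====

-- B replaces A's fused state-machine loop by three phases (find the block prefix,
-- parse it, emit) — objective: simpler; same cost, same return values.

-- ===== PORT A =====
-- A's bottom `if in_properties_block:` body (runs after the first elif branch).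
def pvA_step (i : Int) (ls : String) (st : PySem.Dict String (List String) × Int) :
    PySem.Dict String (List String) × Int :=
  match (PySem.Str.splitMax? ls "::" 1).getD [] with
  | [] => st            -- unreachable: split always returns ≥ 1 piece
  | key0 :: value_parts =>
    let key := PySem.Str.strip key0
    if key == "" then st
    else
      let value_str := match value_parts with
        | [] => ""
        | v :: _ => PySem.Str.strip v
      let key := if key == "alias" then "aliases" else key
      let values := (((PySem.Str.split? value_str ",").getD []).map PySem.Str.strip).filter (fun v => v != "")
      (st.1.insert key values, i + 1)

-- A's `for i, line in enumerate(lines)` loop; `none` = the `return lines, 0` branch.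
def pvA_loop (lines : List String) :
    List String → Nat → PySem.Dict String (List String) × Int → Bool →
    Option (PySem.Dict String (List String) × Int)
  | [], _, st, _ => some st
  | line :: rest, i, st, inB =>
    let ls := PySem.Str.strip line
    if PySem.Str.isIn "::" ls && !(PySem.Str.startswith ls "- ") then
      if i == 0 || inB || (PySem.Str.strip ((PySem.List.pyGet? lines ((i : Int) - 1)).getD "") == "") then
        pvA_loop lines rest (i + 1) (pvA_step (i : Int) ls st) true
      else some st                                   -- break
    else if ls == "" && inB then pvA_loop lines rest (i + 1) st inB   -- continue
    else if inB then some st                         -- break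
    else none                                        -- return lines, 0

def convert_logseq_properties_to_yaml (lines : List String) : List String × Int :=
  match pvA_loop lines lines 0 (PySem.Dict.empty, 0) false with
  | none => (lines, 0)
  | some (props, cnt) =>
    if props.size == 0 then (lines, 0)
    else
      let yaml := (props.items.foldl (fun acc kv =>
          kv.2.foldl (fun a v => a ++ ["  - \"" ++ v ++ "\"\n"]) (acc ++ [kv.1 ++ ":\n"]))
        ["---\n"]) ++ ["---\n"]
      (yaml ++ PySem.List.slice lines (some cnt) none, PySem.List.len yaml)

-- ===== PORT B =====
def pvB_isProp (line : String) : Bool :=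
  let ls := PySem.Str.strip line
  PySem.Str.isIn "::" ls && !(PySem.Str.startswith ls "- ")

-- Phase 1: longest prefix of property-or-blank lines.
def pvB_block : List String → List String
  | [] => []
  | l :: rest =>
    if pvB_isProp l || PySem.Str.strip l == "" then l :: pvB_block rest else []

-- Phase 2: one fold over the enumerated block.
def pvB_pstep (st : PySem.Dict String (List String) × Int) (p : Int × String) :
    PySem.Dict String (List String) × Int :=
  let ls := PySem.Str.strip p.2
  if ls == "" then st
  else
    match (PySem.Str.splitMax? ls "::" 1).getD [] with
    | [] => st
    | key0 :: value_parts =>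
      let key := PySem.Str.strip key0
      if key == "" then st
      else
        let value_str := match value_parts with
          | [] => ""
          | v :: _ => PySem.Str.strip v
        let key := if key == "alias" then "aliases" else key
        let values := (((PySem.Str.split? value_str ",").getD []).map PySem.Str.strip).filter (fun v => v != "")
        (st.1.insert key values, p.1 + 1)

def pvB_parse (block : List String) : PySem.Dict String (List String) × Int :=
  (PySem.List.enumerate block 0).foldl pvB_pstep (PySem.Dict.empty, 0)

def convert_logseq_properties_to_yaml_alt (lines : List String) : List String × Int :=
  match lines with
  | [] => (lines, 0)
  | l0 :: _ =>
    if !pvB_isProp l0 then (lines, 0)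
    else
      match pvB_parse (pvB_block lines) with
      | (props, cut) =>
        if props.size == 0 then (lines, 0)
        else
          let yaml := ["---\n"] ++
            props.items.flatMap (fun kv =>
              (kv.1 ++ ":\n") :: kv.2.map (fun v => "  - \"" ++ v ++ "\"\n")) ++
            ["---\n"]
          (yaml ++ PySem.List.slice lines (some cut) none, PySem.List.len yaml)

-- ===== PRECONDITION & SPEC =====
def Spec_convert_logseq_properties_to_yaml (lines : List String) (out : List String × Int) : Prop := out = convert_logseq_properties_to_yaml_alt lines
instance (lines : List String) (out : List String × Int) : Decidable (Spec_convert_logseq_properties_to_yaml lines out) := by unfold Spec_convert_logseq_properties_to_yaml; infer_instance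

-- ===== CLAIM (what is proved, stated in full; the proofs are below) =====
def Claim_equal_convert_logseq_properties_to_yaml : Prop := ∀ (lines : List String), Dom_convert_logseq_properties_to_yaml lines → Spec_convert_logseq_properties_to_yaml lines (convert_logseq_properties_to_yaml lines)

-- ===== LEMMAS AND PROOFS =====

-- a string containing '::' is not empty
lemma pv_isIn_ne_empty (s : String) (h : PySem.Str.isIn "::" s = true) : (s == "") = false := by
  cases hse : (s == "") with
  | false => rfl
  | true =>
    rw [beq_iff_eq] at hse
    subst hse
    exact absurd h (by decide)

-- pvB_isProp written out as the raw condition A tests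
lemma pv_prop_raw (l : String) (hp : pvB_isProp l = true) :
    (PySem.Str.isIn "::" (PySem.Str.strip l) && !(PySem.Str.startswith (PySem.Str.strip l) "- ")) = true := by
  simpa [pvB_isProp] using hp

lemma pv_prop_raw_f (l : String) (hp : pvB_isProp l = false) :
    (PySem.Str.isIn "::" (PySem.Str.strip l) && !(PySem.Str.startswith (PySem.Str.strip l) "- ")) = false := by
  simpa [pvB_isProp] using hp

lemma pv_prop_ne_blank (l : String) (hp : pvB_isProp l = true) :
    (PySem.Str.strip l == "") = false := by
  apply pv_isIn_ne_empty
  have := pv_prop_raw l hp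
  rw [Bool.and_eq_true] at this
  exact this.1

-- on a non-blank line the two per-line steps coincide
lemma pv_step_eq (i : Int) (line : String) (st : PySem.Dict String (List String) × Int)
    (h : (PySem.Str.strip line == "") = false) :
    pvB_pstep st (i, line) = pvA_step i (PySem.Str.strip line) st := by
  simp only [pvB_pstep, pvA_step, h, Bool.false_eq_true, if_false]

-- computing B's block prefix one line at a time
lemma pv_block_cons_prop {l : String} (rest : List String) (hp : pvB_isProp l = true) :
    pvB_block (l :: rest) = l :: pvB_block rest := by
  simp [pvB_block, hp]

lemma pv_block_cons_blank {l : String} (rest : List String) (hb : (PySem.Str.strip l == "") = true) :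
    pvB_block (l :: rest) = l :: pvB_block rest := by
  simp [pvB_block, hb]

lemma pv_block_cons_stop {l : String} (rest : List String) (hp : pvB_isProp l = false)
    (hb : (PySem.Str.strip l == "") = false) :
    pvB_block (l :: rest) = [] := by
  simp [pvB_block, hp, hb]

-- once in the properties block, A's loop consumes exactly B's block prefix
lemma pv_loop_inB (lines : List String) :
    ∀ (rest : List String) (i : Nat) (st : PySem.Dict String (List String) × Int),
      pvA_loop lines rest i st true =
        some ((PySem.List.enumerate (pvB_block rest) (i : Int)).foldl pvB_pstep st) := by
  intro rest
  induction rest with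
  | nil =>
    intro i st
    simp [pvA_loop, pvB_block]
  | cons l rest ih =>
    intro i st
    rw [pvA_loop]
    by_cases hp : pvB_isProp l = true
    · have hne := pv_prop_ne_blank l hp
      rw [pv_block_cons_prop rest hp, PySem.List.enumerate_cons, List.foldl_cons,
        pv_step_eq _ _ _ hne]
      simp only [pv_prop_raw l hp, Bool.true_or, Bool.or_true, if_true, ih (i + 1)]
      norm_num
    · rw [Bool.not_eq_true] at hp
      by_cases hb : (PySem.Str.strip l == "") = true
      · rw [pv_block_cons_blank rest hb, PySem.List.enumerate_cons, List.foldl_cons]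
        have hskip : pvB_pstep st ((i : Int), l) = st := by
          simp only [pvB_pstep, hb, if_true]
        simp only [pv_prop_raw_f l hp, Bool.false_eq_true, if_false, hb, Bool.and_true,
          if_true, ih (i + 1), hskip]
        norm_num
      · rw [Bool.not_eq_true] at hb
        rw [pv_block_cons_stop rest hp hb]
        simp only [pv_prop_raw_f l hp, Bool.false_eq_true, if_false, hb, Bool.false_and,
          PySem.List.enumerate_nil, List.foldl_nil]
        exact if_pos trivial

-- the inner value loop appends the mapped values
lemma pv_foldl_vals (g : String → String) :
    ∀ (vs : List String) (a : List String),
      vs.foldl (fun a v => a ++ [g v]) a = a ++ vs.map g := by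
  intro vs
  induction vs with
  | nil => simp
  | cons v vs ih => intro a; simp [ih, List.append_assoc]

-- A's emission fold is B's flatMap
lemma pv_emit_eq (items : List (String × List String)) :
    ∀ (init : List String),
      items.foldl (fun acc kv =>
          kv.2.foldl (fun a v => a ++ ["  - \"" ++ v ++ "\"\n"]) (acc ++ [kv.1 ++ ":\n"])) init
        = init ++ items.flatMap (fun kv =>
            (kv.1 ++ ":\n") :: kv.2.map (fun v => "  - \"" ++ v ++ "\"\n")) := by
  induction items with
  | nil => intro init; simp
  | cons kv items ih =>
    intro init
    rw [List.foldl_cons, List.flatMap_cons, ih, pv_foldl_vals]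
    simp [List.append_assoc]

-- ===== VERDICT (by name: the statement is the Claim_ definition above) =====
set_option maxHeartbeats 1000000 in
theorem convert_logseq_properties_to_yaml_spec : Claim_equal_convert_logseq_properties_to_yaml := by
  intro lines _
  unfold Spec_convert_logseq_properties_to_yaml
  match lines with
  | [] => rfl
  | l0 :: rest =>
    by_cases hp : pvB_isProp l0 = true
    · have hne := pv_prop_ne_blank l0 hp
      have hA1 : pvA_loop (l0 :: rest) (l0 :: rest) 0 (PySem.Dict.empty, 0) false =
          some ((PySem.List.enumerate (pvB_block (l0 :: rest)) 0).foldl pvB_pstep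
            (PySem.Dict.empty, 0)) := by
        rw [pvA_loop]
        rw [pv_block_cons_prop rest hp, PySem.List.enumerate_cons, List.foldl_cons,
          pv_step_eq _ _ _ hne]
        simp only [pv_prop_raw l0 hp, if_true]
        rw [pv_loop_inB]
        norm_num
      rcases hps : (PySem.List.enumerate (pvB_block (l0 :: rest)) 0).foldl pvB_pstep
          (PySem.Dict.empty, 0) with ⟨props, cut⟩
      rw [convert_logseq_properties_to_yaml, hA1, hps]
      rw [convert_logseq_properties_to_yaml_alt]
      simp only [hp, Bool.not_true, Bool.false_eq_true, if_false]
      rw [pvB_parse, hps]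
      by_cases hz : (props.size == 0) = true
      · simp only [hz, if_true]
      · rw [Bool.not_eq_true] at hz
        simp only [hz, Bool.false_eq_true, if_false]
        rw [pv_emit_eq]
    · rw [Bool.not_eq_true] at hp
      have hA : pvA_loop (l0 :: rest) (l0 :: rest) 0 (PySem.Dict.empty, 0) false = none := by
        rw [pvA_loop]
        simp only [pv_prop_raw_f l0 hp, Bool.false_eq_true, Bool.and_false, if_false]
      rw [convert_logseq_properties_to_yaml, hA]
      rw [convert_logseq_properties_to_yaml_alt]
      simp only [hp, Bool.not_false, if_true]
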